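-- pv_equiv track=rewrite | github.com/xpakx/aoc | 2025_everybody_codes/quest16.py | part2
-- ===== SOURCE A (Python) =====
-- import math
--
-- class Sieve:
--     def __init__(self, len):
--         self.sieve = [0] * len
--
--     def use(self, number):
--         n = 1
--         while n * number <= len(self.sieve):
--             self.sieve[n*number-1] += 1
--             n += 1
--
--     def check(self, number):
--         return self.sieve[number-1] == 0
--
--     def get(self, number):
--         return self.sieve[number-1]
--
-- def part2(nums):
--     result = []
--     sieve = Sieve(len(nums))
--     for i, val in enumerate(nums):
--         num = i+1
--         v = val - sieve.get(num)
--         if v > 0: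
--             result.append(num)
--             sieve.use(num)
--     return math.prod(result)
-- ===== SOURCE B (Python) =====
-- import math
--
-- def part2(nums):
--     result = []
--     for num in range(1, len(nums) + 1):
--         cnt = sum(1 for j in result if num % j == 0)
--         if nums[num - 1] - cnt > 0:
--             result.append(num)
--     return math.prod(result)
-- ===== Notes on version B (the rewrite author's own statement) =====
-- stated objective: simpler
-- what changed: Dropped the Sieve class and its eagerly-updated multiples array; B keeps only the list of chosen numbers and, for each candidate, counts its chosen divisors by a direct scan of that list.
import Mathlib
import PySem

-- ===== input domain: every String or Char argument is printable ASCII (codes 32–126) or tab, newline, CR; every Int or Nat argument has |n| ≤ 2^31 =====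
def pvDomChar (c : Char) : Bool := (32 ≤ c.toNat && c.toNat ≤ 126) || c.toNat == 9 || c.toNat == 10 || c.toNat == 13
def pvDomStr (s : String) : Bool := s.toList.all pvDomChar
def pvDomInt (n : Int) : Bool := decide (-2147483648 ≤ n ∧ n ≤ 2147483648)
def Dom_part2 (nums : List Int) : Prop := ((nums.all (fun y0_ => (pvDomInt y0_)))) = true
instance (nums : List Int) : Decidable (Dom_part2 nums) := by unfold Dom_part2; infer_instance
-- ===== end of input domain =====

-- B drops the Sieve class/array: it keeps only the chosen list and counts, per step, the
-- chosen divisors by a direct scan (lazy counting instead of eagerly pushing increments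
-- to all multiples); same return value, objective: simpler.


-- ===== PORT A =====
-- Sieve.use: while n*number <= len(sieve): sieve[n*number-1] += 1; n += 1
-- (the 0 < number guard only makes the loop total; use is only called with number = i+1 ≥ 1)
def useLoop (sieve : List Int) (number n : Nat) : List Int :=
  if h : 0 < number ∧ n * number ≤ sieve.length then
    useLoop (sieve.set (n * number - 1) (sieve.getD (n * number - 1) 0 + 1)) number (n + 1)
  else sieve
termination_by sieve.length + 1 - n
decreasing_by
  have := Nat.le_mul_of_pos_right n h.1
  simp only [List.length_set]; omega

def part2 (nums : List Int) : Int :=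
  let st := (PySem.List.enumerate nums 0).foldl
    (fun (st : List Int × List Int) p =>
      let num : Int := p.1 + 1
      let v : Int := p.2 - st.2.getD (num - 1).toNat 0
      if v > 0 then (st.1 ++ [num], useLoop st.2 num.toNat 1) else st)
    ([], List.replicate nums.length 0)
  st.1.foldl (· * ·) 1

-- ===== PORT B =====
def part2_alt (nums : List Int) : Int :=
  let result := (PySem.List.pyRange 1 ((nums.length : Int) + 1) 1).foldl
    (fun (res : List Int) num =>
      let cnt : Int := res.foldl (fun acc j => if PySem.Int.mod num j == 0 then acc + 1 else acc) 0
      if PySem.List.pyGetD nums (num - 1) 0 - cnt > 0 then res ++ [num] else res)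
    []
  result.foldl (· * ·) 1

-- ===== PRECONDITION & SPEC =====
def Spec_part2 (nums : List Int) (out : Int) : Prop := out = part2_alt nums
instance (nums : List Int) (out : Int) : Decidable (Spec_part2 nums out) := by unfold Spec_part2; infer_instance

-- ===== CLAIM (what is proved, stated in full; the proofs are below) =====
def Claim_equal_part2 : Prop := ∀ (nums : List Int), Dom_part2 nums → Spec_part2 nums (part2 nums)


-- ===== LEMMAS AND PROOFS =====

-- proof-side step functions: the loop bodies of the two ports, re-indexed over Nat k
def stepA (nums : List Int) (st : List Int × List Int) (k : Nat) : List Int × List Int :=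
  if nums.getD k 0 - st.2.getD k 0 > 0 then (st.1 ++ [(k : Int) + 1], useLoop st.2 (k + 1) 1) else st

def stepB (nums : List Int) (res : List Int) (k : Nat) : List Int :=
  let cnt : Int := res.foldl (fun acc j => if PySem.Int.mod ((k : Int) + 1) j == 0 then acc + 1 else acc) 0
  if nums.getD k 0 - cnt > 0 then res ++ [(k : Int) + 1] else res

theorem useLoop_length (sieve : List Int) (number n : Nat) :
    (useLoop sieve number n).length = sieve.length := by
  fun_induction useLoop with
  | case1 s n h ih => rw [ih]; simp
  | case2 => rfl

-- useLoop starting at n adds 1 exactly at the cells m with number ∣ m+1 and n*number ≤ m+1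
theorem useLoop_getD (sieve : List Int) (number n : Nat) (hnum : 0 < number) :
    ∀ m, 0 < n → m < sieve.length → (useLoop sieve number n).getD m 0 =
      sieve.getD m 0 + (if number ∣ (m + 1) ∧ n * number ≤ m + 1 then 1 else 0) := by
  fun_induction useLoop with
  | case1 s n h ih =>
    intro m hn hm
    have hm' : m < (s.set (n * number - 1) (s.getD (n * number - 1) 0 + 1)).length := by
      simpa using hm
    rw [ih m (by omega) hm']
    have hge : 1 ≤ n * number := Nat.mul_pos hn hnum
    rcases eq_or_ne m (n * number - 1) with he | hne
    · subst he
      have hmul : (n * number - 1) + 1 = n * number := by omega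
      have hdvd : number ∣ (n * number - 1) + 1 := by
        rw [hmul]; exact dvd_mul_left number n
      have hle : n * number ≤ (n * number - 1) + 1 := by omega
      have hnle : ¬ (n + 1) * number ≤ (n * number - 1) + 1 := by
        have hexp : (n + 1) * number = n * number + number := by ring
        omega
      have hset : (s.set (n * number - 1) (s.getD (n * number - 1) 0 + 1)).getD (n * number - 1) 0
          = s.getD (n * number - 1) 0 + 1 := by
        rw [List.getD_eq_getElem?_getD, List.getElem?_set_self (by simpa using hm)]
        rfl
      rw [hset, if_neg (fun hc => hnle hc.2), if_pos ⟨hdvd, hle⟩]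
      ring
    · have hset : (s.set (n * number - 1) (s.getD (n * number - 1) 0 + 1)).getD m 0 = s.getD m 0 := by
        rw [List.getD_eq_getElem?_getD, List.getElem?_set_ne (by omega), ← List.getD_eq_getElem?_getD]
      rw [hset]
      congr 1
      have hiff : (number ∣ m + 1 ∧ (n + 1) * number ≤ m + 1) ↔ (number ∣ m + 1 ∧ n * number ≤ m + 1) := by
        constructor
        · rintro ⟨hd, hle⟩
          exact ⟨hd, le_trans (by nlinarith) hle⟩
        · rintro ⟨hd, hle⟩
          refine ⟨hd, ?_⟩
          obtain ⟨q, hq⟩ := hd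
          have hnq : n ≤ q := Nat.le_of_mul_le_mul_right
            (by rw [Nat.mul_comm q number, ← hq]; exact hle) hnum
          have hq1 : n + 1 ≤ q := by
            rcases eq_or_lt_of_le hnq with heq | hlt
            · exfalso; apply hne; rw [← heq, Nat.mul_comm] at hq; omega
            · omega
          calc (n + 1) * number ≤ q * number := Nat.mul_le_mul_right number hq1
            _ = m + 1 := by rw [Nat.mul_comm, ← hq]
      simp [hiff]
  | case2 s n h =>
    intro m hn hm
    have hcond : ¬ (number ∣ m + 1 ∧ n * number ≤ m + 1) := by
      rintro ⟨hd, hle⟩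
      exact h ⟨hnum, by omega⟩
    rw [if_neg hcond, add_zero]

-- the invariant: equal chosen lists, and each sieve cell m holds B's divisor count for m+1
theorem loop_invariant (nums : List Int) (k : Nat) (hk : k ≤ nums.length) :
    ((List.range k).foldl (stepA nums) ([], List.replicate nums.length 0)).1 =
      (List.range k).foldl (stepB nums) [] ∧
    ((List.range k).foldl (stepA nums) ([], List.replicate nums.length 0)).2.length = nums.length ∧
    ∀ m, m < nums.length →
      ((List.range k).foldl (stepA nums) ([], List.replicate nums.length 0)).2.getD m 0 =
        ((List.range k).foldl (stepB nums) []).foldl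
          (fun acc j => if PySem.Int.mod ((m : Int) + 1) j == 0 then acc + 1 else acc) 0 := by
  induction k with
  | zero => simp
  | succ k ih =>
    obtain ⟨h1, h2, h3⟩ := ih (by omega)
    rw [List.range_succ, List.foldl_append, List.foldl_append]
    simp only [List.foldl_cons, List.foldl_nil]
    set stA := (List.range k).foldl (stepA nums) ([], List.replicate nums.length 0) with hstA
    set res := (List.range k).foldl (stepB nums) [] with hres
    rw [← h1] at h3 ⊢
    simp only [stepA, stepB]
    have hcnt' : stA.1.foldl (fun acc j => if PySem.Int.mod ((k : Int) + 1) j == 0 then acc + 1 else acc) 0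
        = stA.2.getD k 0 := (h3 k (by omega)).symm
    rw [hcnt']
    by_cases hv : nums.getD k 0 - stA.2.getD k 0 > 0
    · rw [if_pos hv, if_pos hv]
      refine ⟨rfl, by rw [useLoop_length]; exact h2, ?_⟩
      intro m hm
      rw [useLoop_getD stA.2 (k + 1) 1 (by omega) m (by omega) (by omega),
          List.foldl_append]
      simp only [List.foldl_cons, List.foldl_nil]
      rw [← h3 m hm]
      have hmod : (PySem.Int.mod ((m : Int) + 1) ((k : Int) + 1) = 0) ↔ (k + 1) ∣ (m + 1) := by
        rw [PySem.Int.mod_eq_zero_iff_dvd]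
        constructor
        · intro hii
          have : ((k + 1 : Nat) : Int) ∣ ((m + 1 : Nat) : Int) := by push_cast; exact hii
          exact_mod_cast this
        · intro hii
          have : ((k + 1 : Nat) : Int) ∣ ((m + 1 : Nat) : Int) := by exact_mod_cast hii
          push_cast at this; exact this
      by_cases hd : (k + 1) ∣ (m + 1)
      · have hle : 1 * (k + 1) ≤ m + 1 := by
          have := Nat.le_of_dvd (by omega) hd; omega
        rw [if_pos ⟨hd, hle⟩, if_pos (by simpa using hmod.mpr hd)]
      · rw [if_neg (fun hc => hd hc.1), if_neg (by simpa using fun hc => hd (hmod.mp hc)), add_zero]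
    · rw [if_neg hv, if_neg hv]
      exact ⟨rfl, h2, h3⟩

theorem part2_eq_foldA (nums : List Int) :
    part2 nums = (((List.range nums.length).foldl (stepA nums) ([], List.replicate nums.length 0)).1).foldl (· * ·) 1 := by
  unfold part2
  rw [PySem.List.enumerate_eq_map_pyRange nums 0, PySem.List.len_eq, List.foldl_map,
      PySem.List.pyRange_one, List.foldl_map]
  have hlen : ((nums.length : Int) - 0).toNat = nums.length := by omega
  rw [hlen]
  dsimp only
  congr 1
  congr 1
  apply List.foldl_ext
  intro st k hkmem
  have hk : k < nums.length := List.mem_range.mp hkmem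
  simp only [stepA, zero_add]
  have h1 : ((k : Int) + 1 - 1).toNat = k := by omega
  have h2 : ((k : Int) + 1).toNat = k + 1 := by omega
  rw [h1, h2, PySem.List.pyGetD_natCast]

theorem part2_alt_eq_foldB (nums : List Int) :
    part2_alt nums = ((List.range nums.length).foldl (stepB nums) []).foldl (· * ·) 1 := by
  unfold part2_alt
  rw [PySem.List.pyRange_one, List.foldl_map]
  have hlen : ((nums.length : Int) + 1 - 1).toNat = nums.length := by omega
  rw [hlen]
  dsimp only
  congr 1
  apply List.foldl_ext
  intro res k hkmem
  have hk : k < nums.length := List.mem_range.mp hkmem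
  simp only [stepB]
  have h1 : (1 : Int) + (k : Int) - 1 = (k : Int) := by omega
  have h2 : (1 : Int) + (k : Int) = (k : Int) + 1 := by omega
  rw [h1, h2, PySem.List.pyGetD_natCast]

theorem part2_main (nums : List Int) : part2 nums = part2_alt nums := by
  rw [part2_eq_foldA, part2_alt_eq_foldB, (loop_invariant nums nums.length le_rfl).1]

-- ===== VERDICT (by name: the statement is the Claim_ definition above) =====
theorem part2_spec : Claim_equal_part2 := by
  intro nums _; exact part2_main nums
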